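-- pv_equiv track=rewrite | github.com/sahmedASC/Nothing-of-note | CS 1/Homework/hw6/hw6Part1.py | fix_words
-- ===== SOURCE A (Python) =====
-- def fix_words(dic,word,letters):
--     #these are return values and lists for computation and check variables
--     match = 'NO MATCH'
--     found = 'FOUND'
--     swap = 'SWAP'
--     replace = 'REPLACE'
--     drop = 'DROP'
--     soldrop = []
--     solswap = []
--     solrep = []
--     tdrop = False
--     tswap = False
--     trep = False
--
--     #simple check to see if the word already exists
--     if word in dic:
--         return (found,word)
--
--     #drop test. delete one element at a time and re-check. re-instate the value
--     #after checking
--     s = list(word) #The words becomes a list for all computation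
--
--     length = len(s)
--     for i in range(length):
--         del s[i]
--         test = "".join(s)
--         if test in dic:
--             tdrop = True
--             soldrop.append(test)
--         s= list(word)
--
--     if tdrop:
--         return (drop, min(soldrop))
--
--     #swap check. First conditional to make sure no index error. Store the
--     #original values first. swap them and check. reset the list after each time
--     for j in range(len(s)):
--         if j == (len(s)-1):
--             break
--         swap1 = s[j]
--         swap2 = s[j+1]
--
--         s[j] = swap2
--         s[j+1] = swap1
--
--         test = "".join(s)
--         if test in dic:
--             tswap = True
--             solswap.append(test)
--         s = list(word)
--
--     if tswap:
--         return (swap, min(solswap))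
--
--     #replace check. Run through each element of the list and replace with the
--     #alphabet. check to see if it is in the dictionary. reset the value afterwards.
--     for x in range(len(s)):
--         primary = s[x]
--         for y in letters:
--             s[x] = y
--             test = "".join(s)
--             if test in dic:
--                 trep = True
--                 solrep.append(test)
--             s[x] =primary
--
--     if trep:
--         return (replace, min(solrep))
--
--     return (match,word)
-- ===== SOURCE B (Python) =====
-- # B: one scan over the dictionary, classifying each entry against `word`
-- # (drop / adjacent-swap / single-letter-replace) instead of generating every
-- # candidate edit and testing membership for each.
--
-- def _mismatch(w, word):
--     # index of the first position where w and word differ (or len(w))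
--     i = 0
--     while i < len(w) and w[i] == word[i]:
--         i += 1
--     return i
--
-- def _is_drop(w, word):
--     i = _mismatch(w, word)
--     return w[i:] == word[i + 1:]
--
-- def _is_swap(w, word):
--     i = _mismatch(w, word)
--     return (i + 1 < len(w) and w[i] == word[i + 1] and w[i + 1] == word[i]
--             and w[i + 2:] == word[i + 2:])
--
-- def _is_replace(w, word, letters):
--     i = _mismatch(w, word)
--     return i < len(w) and w[i] in letters and w[i + 1:] == word[i + 1:]
--
-- def fix_words(dic, word, letters):
--     if word in dic:
--         return ('FOUND', word)
--     n = len(word)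
--     drops, swaps, replaces = [], [], []
--     for w in dic:
--         if len(w) == n - 1 and _is_drop(w, word):
--             drops.append(w)
--         elif len(w) == n and _is_swap(w, word):
--             swaps.append(w)
--         elif len(w) == n and _is_replace(w, word, letters):
--             replaces.append(w)
--     if drops:
--         return ('DROP', min(drops))
--     if swaps:
--         return ('SWAP', min(swaps))
--     if replaces:
--         return ('REPLACE', min(replaces))
--     return ('NO MATCH', word)
-- ===== Notes on version B (the rewrite author's own statement) =====
-- stated objective: faster
-- what changed: A generates every drop/swap/replace candidate of the word and scans the whole dictionary for each one; B makes a single pass over the dictionary classifying each entry (one-char deletion / adjacent transposition / single replacement by an allowed letter) and takes the per-bucket minimum in drop>swap>replace priority.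
import Mathlib
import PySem

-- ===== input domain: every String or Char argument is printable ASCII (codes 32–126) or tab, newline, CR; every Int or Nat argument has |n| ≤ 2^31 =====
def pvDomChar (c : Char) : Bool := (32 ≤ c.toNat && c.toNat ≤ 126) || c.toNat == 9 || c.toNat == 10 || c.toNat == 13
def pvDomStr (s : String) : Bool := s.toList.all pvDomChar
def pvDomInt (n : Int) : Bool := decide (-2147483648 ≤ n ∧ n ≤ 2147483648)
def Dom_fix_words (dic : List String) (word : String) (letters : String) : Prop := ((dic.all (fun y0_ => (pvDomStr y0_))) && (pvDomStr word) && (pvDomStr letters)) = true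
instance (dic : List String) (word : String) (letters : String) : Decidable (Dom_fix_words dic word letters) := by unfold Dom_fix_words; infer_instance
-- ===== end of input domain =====

-- B replaces A's generate-and-test (build every drop/swap/replace candidate of `word` and scan
-- the dictionary for each) by a single classifying scan over the dictionary; objective: faster.

-- ===== PORT A =====
-- 'if test in dic: t... = True; sol....append(test)', shared by A's three loops
def pvStepA (dic : List String) (st : Bool × List String) (test : String) : Bool × List String :=
  if test ∈ dic then (true, st.2 ++ [test]) else st

def fix_words (dic : List String) (word : String) (letters : String) : String × String :=
  if word ∈ dic then ("FOUND", word)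
  else
    let s := word.toList                      -- s = list(word)
    let length := s.length
    -- drop loop: del s[i]; test = "".join(s); s = list(word)
    let dropSt := (List.range length).foldl
      (fun st i => pvStepA dic st (String.ofList (s.eraseIdx i))) (false, [])
    if dropSt.1 then ("DROP", (PySem.List.min? dropSt.2 (fun x => x)).getD word)
    else
      -- swap loop: 'for j in range(len(s))' with 'break' at j == len(s)-1, i.e. j runs over range(len(s)-1)
      let swapSt := (List.range (length - 1)).foldl
        (fun st j =>
          let swap1 := s.getD j ' '
          let swap2 := s.getD (j+1) ' '
          pvStepA dic st (String.ofList ((s.set j swap2).set (j+1) swap1))) (false, [])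
      if swapSt.1 then ("SWAP", (PySem.List.min? swapSt.2 (fun x => x)).getD word)
      else
        -- replace loop: for x in range(len(s)): for y in letters: s[x] = y; test; s[x] = primary
        let repSt := (List.range length).foldl
          (fun st x => letters.toList.foldl
            (fun st2 y => pvStepA dic st2 (String.ofList (s.set x y))) st) (false, [])
        if repSt.1 then ("REPLACE", (PySem.List.min? repSt.2 (fun x => x)).getD word)
        else ("NO MATCH", word)

-- ===== PORT B =====
-- _mismatch: index of the first position where v and w differ (v exhausted ⇒ its length)
def pvMismatch : List Char → List Char → Nat
  | a :: vs, c :: cs => if a == c then pvMismatch vs cs + 1 else 0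
  | _, _ => 0

def isDropB (v w : List Char) : Bool :=        -- _is_drop
  let i := pvMismatch v w
  v.drop i == w.drop (i + 1)

def isSwapB (v w : List Char) : Bool :=        -- _is_swap
  let i := pvMismatch v w
  decide (i + 1 < v.length) && (v.getD i ' ' == w.getD (i + 1) ' ')
    && (v.getD (i + 1) ' ' == w.getD i ' ') && (v.drop (i + 2) == w.drop (i + 2))

def isRepB (v w L : List Char) : Bool :=       -- _is_replace
  let i := pvMismatch v w
  decide (i < v.length) && L.contains (v.getD i ' ') && (v.drop (i + 1) == w.drop (i + 1))

-- one classifying step of B's single scan over dic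
def pvStepB (wl : List Char) (L : List Char) (n : Int)
    (st : List String × List String × List String) (w : String) :
    List String × List String × List String :=
  if ((w.toList.length : Int) == n - 1) && isDropB w.toList wl then (st.1 ++ [w], st.2.1, st.2.2)
  else if ((w.toList.length : Int) == n) && isSwapB w.toList wl then (st.1, st.2.1 ++ [w], st.2.2)
  else if ((w.toList.length : Int) == n) && isRepB w.toList wl L then (st.1, st.2.1, st.2.2 ++ [w])
  else st

def fix_words_alt (dic : List String) (word : String) (letters : String) : String × String :=
  if word ∈ dic then ("FOUND", word)
  else
    let wl := word.toList
    let n : Int := wl.length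
    let st := dic.foldl (pvStepB wl letters.toList n) ([], [], [])
    if st.1 ≠ [] then ("DROP", (PySem.List.min? st.1 (fun x => x)).getD word)
    else if st.2.1 ≠ [] then ("SWAP", (PySem.List.min? st.2.1 (fun x => x)).getD word)
    else if st.2.2 ≠ [] then ("REPLACE", (PySem.List.min? st.2.2 (fun x => x)).getD word)
    else ("NO MATCH", word)

-- ===== PRECONDITION & SPEC =====
def Spec_fix_words (dic : List String) (word : String) (letters : String) (out : String × String) : Prop := out = fix_words_alt dic word letters
instance (dic : List String) (word : String) (letters : String) (out : String × String) : Decidable (Spec_fix_words dic word letters out) := by unfold Spec_fix_words; infer_instance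

-- ===== CLAIM (what is proved, stated in full; the proofs are below) =====
def Claim_equal_fix_words : Prop := ∀ (dic : List String) (word : String) (letters : String), Dom_fix_words dic word letters → Spec_fix_words dic word letters (fix_words dic word letters)

-- ===== LEMMAS AND PROOFS =====

-- shape of A's test-and-append loops
theorem foldA_eq {α : Type} (dic : List String) (g : α → String) (l : List α) (st : Bool × List String) :
    l.foldl (fun st x => pvStepA dic st (g x)) st
      = (st.1 || (l.map g).any (fun t => decide (t ∈ dic)),
         st.2 ++ (l.map g).filter (fun t => decide (t ∈ dic))) := by
  induction l generalizing st with
  | nil => simp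
  | cons a l ih =>
      rw [List.foldl_cons]
      by_cases h : g a ∈ dic
      · have hs : pvStepA dic st (g a) = (true, st.2 ++ [g a]) := by simp [pvStepA, h]
        rw [hs, ih]; simp [h]
      · have hs : pvStepA dic st (g a) = st := by simp [pvStepA, h]
        rw [hs, ih]; simp [h]

-- shape of A's replace loop after the inner loop is summarised
theorem foldOr_eq {α : Type} (l : List α) (B : α → Bool) (F : α → List String) (st : Bool × List String) :
    l.foldl (fun st x => (st.1 || B x, st.2 ++ F x)) st = (st.1 || l.any B, st.2 ++ l.flatMap F) := by
  induction l generalizing st with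
  | nil => simp
  | cons a l ih => rw [List.foldl_cons, ih]; simp [Bool.or_assoc]

-- shape of B's classifying scan
theorem foldB_eq (wl L : List Char) (n : Int) (dic : List String)
    (st : List String × List String × List String) :
    dic.foldl (pvStepB wl L n) st
      = (st.1 ++ dic.filter (fun w => ((w.toList.length : Int) == n - 1) && isDropB w.toList wl),
         st.2.1 ++ dic.filter (fun w => !(((w.toList.length : Int) == n - 1) && isDropB w.toList wl)
                && (((w.toList.length : Int) == n) && isSwapB w.toList wl)),
         st.2.2 ++ dic.filter (fun w => !(((w.toList.length : Int) == n - 1) && isDropB w.toList wl)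
                && !(((w.toList.length : Int) == n) && isSwapB w.toList wl)
                && (((w.toList.length : Int) == n) && isRepB w.toList wl L))) := by
  induction dic generalizing st with
  | nil => simp
  | cons w dic ih =>
      rw [List.foldl_cons]
      by_cases h1 : (((w.toList.length : Int) == n - 1) && isDropB w.toList wl) = true
      · have hs : pvStepB wl L n st w = (st.1 ++ [w], st.2.1, st.2.2) := by
          simp only [pvStepB, h1, if_pos]
        rw [hs, ih]
        simp only [List.filter_cons, h1, Bool.not_true, Bool.false_and, if_pos, if_neg,
          Bool.false_eq_true, not_false_eq_true]
        simp
      · rw [Bool.not_eq_true] at h1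
        by_cases h2 : (((w.toList.length : Int) == n) && isSwapB w.toList wl) = true
        · have hs : pvStepB wl L n st w = (st.1, st.2.1 ++ [w], st.2.2) := by
            simp only [pvStepB, h1, h2, Bool.false_eq_true, if_neg, if_pos, not_false_eq_true]
          rw [hs, ih]
          simp only [List.filter_cons, h1, h2, Bool.not_false, Bool.true_and, Bool.and_true]
          simp
        · rw [Bool.not_eq_true] at h2
          by_cases h3 : (((w.toList.length : Int) == n) && isRepB w.toList wl L) = true
          · have hs : pvStepB wl L n st w = (st.1, st.2.1, st.2.2 ++ [w]) := by
              simp only [pvStepB, h1, h2, h3, Bool.false_eq_true, if_neg, if_pos, not_false_eq_true]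
            rw [hs, ih]
            simp only [List.filter_cons, h1, h2, h3, Bool.not_false, Bool.true_and, Bool.and_true]
            simp
          · rw [Bool.not_eq_true] at h3
            have hs : pvStepB wl L n st w = st := by
              simp only [pvStepB, h1, h2, h3, Bool.false_eq_true, if_neg, not_false_eq_true]
            rw [hs, ih]
            simp only [List.filter_cons, h1, h2, h3, Bool.not_false, Bool.true_and, Bool.and_true]
            simp

theorem pvMismatch_cons_eq (a : Char) (vs cs : List Char) :
    pvMismatch (a :: vs) (a :: cs) = pvMismatch vs cs + 1 := by simp [pvMismatch]

theorem pvMismatch_cons_ne (a c : Char) (vs cs : List Char) (h : ¬ a = c) :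
    pvMismatch (a :: vs) (c :: cs) = 0 := by simp [pvMismatch, h]

-- pvMismatch points at a genuine difference whenever it is inside both lists
theorem pvMismatch_ne (v w : List Char) (hv : pvMismatch v w < v.length)
    (hw : pvMismatch v w < w.length) : v.getD (pvMismatch v w) ' ' ≠ w.getD (pvMismatch v w) ' ' := by
  induction v generalizing w with
  | nil => simp at hv
  | cons a vs ih =>
      cases w with
      | nil => simp at hw
      | cons c cs =>
          by_cases h : a = c
          · subst h
            rw [pvMismatch_cons_eq] at hv hw ⊢
            simp only [List.length_cons] at hv hw
            simpa using ih cs (by omega) (by omega)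
          · rw [pvMismatch_cons_ne a c vs cs h]
            simpa using h

-- characterisation of B's drop test: v is word with exactly one character deleted
theorem isDropB_iff (v w : List Char) :
    ((v.length : Int) = (w.length : Int) - 1 ∧ isDropB v w = true)
      ↔ ∃ i < w.length, v = w.eraseIdx i := by
  induction w generalizing v with
  | nil =>
      constructor
      · rintro ⟨h, -⟩; simp at h
      · rintro ⟨i, hi, -⟩; simp at hi
  | cons c cs ih =>
      cases v with
      | nil =>
          constructor
          · rintro ⟨-, hd⟩
            have hcs : cs = [] := by simpa [isDropB, pvMismatch] using hd
            exact ⟨0, by simp, by simp [hcs]⟩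
          · rintro ⟨i, hi, he⟩
            cases i with
            | zero =>
                simp only [List.eraseIdx_cons_zero] at he
                exact ⟨by simp [← he], by simp [isDropB, pvMismatch, ← he]⟩
            | succ j => simp at he
      | cons a vs =>
          by_cases h : a = c
          · subst h
            have e2 : isDropB (a :: vs) (a :: cs) = isDropB vs cs := by
              simp [isDropB, pvMismatch_cons_eq, List.drop_succ_cons]
            rw [e2]
            constructor
            · rintro ⟨hl, hd⟩
              have hl' : (vs.length : Int) = (cs.length : Int) - 1 := by
                simp only [List.length_cons] at hl; push_cast at hl ⊢; omega
              obtain ⟨i, hi, he⟩ := (ih vs).mp ⟨hl', hd⟩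
              exact ⟨i + 1, by simpa using hi, by simp [he]⟩
            · rintro ⟨i, hi, he⟩
              have hx : ∃ i < cs.length, vs = cs.eraseIdx i := by
                cases i with
                | zero =>
                    simp only [List.eraseIdx_cons_zero] at he
                    exact ⟨0, by simp [← he], by simp [← he]⟩
                | succ j =>
                    simp only [List.eraseIdx_cons_succ, List.cons.injEq] at he
                    exact ⟨j, by simpa using hi, he.2⟩
              obtain ⟨hl', hd⟩ := (ih vs).mpr hx
              refine ⟨?_, hd⟩
              simp only [List.length_cons]; push_cast at hl' ⊢; omega
          · have e2 : isDropB (a :: vs) (c :: cs) = (a :: vs == cs) := by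
              simp [isDropB, pvMismatch_cons_ne a c vs cs h]
            rw [e2]
            constructor
            · rintro ⟨-, hd⟩
              have : a :: vs = cs := by simpa using hd
              exact ⟨0, by simp, by simp [this]⟩
            · rintro ⟨i, hi, he⟩
              cases i with
              | zero =>
                  simp only [List.eraseIdx_cons_zero] at he
                  exact ⟨by simp [he], by simp [he]⟩
              | succ j =>
                  simp only [List.eraseIdx_cons_succ, List.cons.injEq] at he
                  exact absurd he.1 h

-- characterisation of B's swap test (for v ≠ w): v is word with two adjacent characters swapped
theorem isSwapB_iff (v w : List Char) (hne : v ≠ w) :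
    ((v.length : Int) = (w.length : Int) ∧ isSwapB v w = true)
      ↔ ∃ j, j + 1 < w.length ∧ v = (w.set j (w.getD (j+1) ' ')).set (j+1) (w.getD j ' ') := by
  induction w generalizing v with
  | nil =>
      constructor
      · rintro ⟨hl, -⟩
        exact absurd (List.eq_nil_of_length_eq_zero (by exact_mod_cast hl)) hne
      · rintro ⟨j, hj, -⟩; simp at hj
  | cons c cs ih =>
      cases v with
      | nil =>
          constructor
          · rintro ⟨hl, -⟩; exfalso
            simp only [List.length_nil, List.length_cons] at hl; omega
          · rintro ⟨j, hj, he⟩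
            have := congrArg List.length he
            simp at this
      | cons a vs =>
          by_cases h : a = c
          · subst h
            have hne' : vs ≠ cs := fun hh => hne (by rw [hh])
            have e2 : isSwapB (a :: vs) (a :: cs) = isSwapB vs cs := by
              simp [isSwapB, pvMismatch_cons_eq, List.drop_succ_cons]
            rw [e2]
            constructor
            · rintro ⟨hl, hs⟩
              have hl' : (vs.length : Int) = (cs.length : Int) := by
                simp only [List.length_cons] at hl; push_cast at hl ⊢; omega
              obtain ⟨j, hj, he⟩ := (ih vs hne').mp ⟨hl', hs⟩
              refine ⟨j + 1, by simpa using hj, ?_⟩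
              simp [List.set_cons_succ, he]
            · rintro ⟨j, hj, he⟩
              cases j with
              | zero =>
                  cases cs with
                  | nil => simp at hj
                  | cons d cs' =>
                      simp only [List.getD_cons_succ, List.getD_cons_zero, List.set_cons_zero,
                        List.set_cons_succ, List.cons.injEq] at he
                      -- he : a = d ∧ vs = a :: cs'  forces v = w
                      exact absurd (show vs = d :: cs' by rw [he.2, he.1]) hne'
              | succ j =>
                  simp only [List.getD_cons_succ, List.set_cons_succ, List.cons.injEq, true_and] at he
                  obtain ⟨hl', hs⟩ := (ih vs hne').mpr ⟨j, by simpa using hj, he⟩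
                  refine ⟨?_, hs⟩
                  simp only [List.length_cons]; push_cast at hl' ⊢; omega
          · have e1 := pvMismatch_cons_ne a c vs cs h
            have e2 : isSwapB (a :: vs) (c :: cs)
                = (decide (1 < vs.length + 1) && (a == (c :: cs).getD 1 ' ')
                    && (vs.getD 0 ' ' == c) && (vs.drop 1 == cs.drop 1)) := by
              simp [isSwapB, e1]
            rw [e2]
            constructor
            · rintro ⟨hl, hs⟩
              simp only [Bool.and_eq_true, beq_iff_eq, decide_eq_true_eq] at hs
              obtain ⟨⟨⟨h1, h2⟩, h3⟩, h4⟩ := hs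
              cases cs with
              | nil => exfalso; simp only [List.length_cons, List.length_nil] at hl; omega
              | cons d cs' =>
                  cases vs with
                  | nil => simp at h1
                  | cons b vs' =>
                      simp only [List.getD_cons_succ, List.getD_cons_zero] at h2 h3
                      simp only [List.drop_succ_cons, List.drop_zero] at h4
                      refine ⟨0, by simp, ?_⟩
                      simp only [List.getD_cons_succ, List.getD_cons_zero, List.set_cons_zero,
                        List.set_cons_succ]
                      have h5 : vs' = cs' := by simpa using h4
                      simp [h2, h3, h5]
            · rintro ⟨j, hj, he⟩
              cases j with
              | zero =>
                  cases cs with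
                  | nil => simp at hj
                  | cons d cs' =>
                      simp only [List.getD_cons_succ, List.getD_cons_zero, List.set_cons_zero,
                        List.set_cons_succ, List.cons.injEq] at he
                      obtain ⟨had, hvs⟩ := he
                      subst had hvs
                      exact ⟨by simp, by simp⟩
              | succ j =>
                  simp only [List.set_cons_succ, List.cons.injEq] at he
                  exact absurd he.1 h

-- characterisation of B's replace test (for v ≠ w): one position replaced by a letter of `letters`
theorem isRepB_iff (L : List Char) (v w : List Char) (hne : v ≠ w) :
    ((v.length : Int) = (w.length : Int) ∧ isRepB v w L = true)
      ↔ ∃ x < w.length, ∃ y ∈ L, v = w.set x y := by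
  induction w generalizing v with
  | nil =>
      constructor
      · rintro ⟨hl, -⟩
        exact absurd (List.eq_nil_of_length_eq_zero (by exact_mod_cast hl)) hne
      · rintro ⟨x, hx, -⟩; simp at hx
  | cons c cs ih =>
      cases v with
      | nil =>
          constructor
          · rintro ⟨hl, -⟩; exfalso
            simp only [List.length_nil, List.length_cons] at hl; omega
          · rintro ⟨x, hx, y, hy, he⟩
            have := congrArg List.length he
            simp at this
      | cons a vs =>
          by_cases h : a = c
          · subst h
            have hne' : vs ≠ cs := fun hh => hne (by rw [hh])
            have e2 : isRepB (a :: vs) (a :: cs) L = isRepB vs cs L := by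
              simp [isRepB, pvMismatch_cons_eq, List.drop_succ_cons]
            rw [e2]
            constructor
            · rintro ⟨hl, hr⟩
              have hl' : (vs.length : Int) = (cs.length : Int) := by
                simp only [List.length_cons] at hl; push_cast at hl ⊢; omega
              obtain ⟨x, hx, y, hy, he⟩ := (ih vs hne').mp ⟨hl', hr⟩
              exact ⟨x + 1, by simpa using hx, y, hy, by simp [List.set_cons_succ, he]⟩
            · rintro ⟨x, hx, y, hy, he⟩
              cases x with
              | zero =>
                  simp only [List.set_cons_zero, List.cons.injEq] at he
                  exact absurd he.2 hne'
              | succ x =>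
                  simp only [List.set_cons_succ, List.cons.injEq, true_and] at he
                  obtain ⟨hl', hr⟩ := (ih vs hne').mpr ⟨x, by simpa using hx, y, hy, he⟩
                  refine ⟨?_, hr⟩
                  simp only [List.length_cons]; push_cast at hl' ⊢; omega
          · have e2 : isRepB (a :: vs) (c :: cs) L
                = (decide (0 < vs.length + 1) && L.contains a && (vs == cs)) := by
              simp [isRepB, pvMismatch_cons_ne a c vs cs h]
            rw [e2]
            constructor
            · rintro ⟨hl, hr⟩
              simp only [Bool.and_eq_true, beq_iff_eq, decide_eq_true_eq] at hr
              obtain ⟨⟨-, h2⟩, h3⟩ := hr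
              exact ⟨0, by simp, a, by simpa using h2, by simp [h3]⟩
            · rintro ⟨x, hx, y, hy, he⟩
              cases x with
              | zero =>
                  simp only [List.set_cons_zero, List.cons.injEq] at he
                  refine ⟨by simp [he.2], ?_⟩
                  simp only [Bool.and_eq_true, beq_iff_eq, decide_eq_true_eq]
                  exact ⟨⟨by omega, by simpa [he.1] using hy⟩, he.2⟩
              | succ x =>
                  simp only [List.set_cons_succ, List.cons.injEq] at he
                  exact absurd he.1 h

-- a word of the right length cannot pass both the swap and the replace test
theorem not_swap_of_rep (L v w : List Char) (hlen : v.length = w.length)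
    (hr : isRepB v w L = true) : isSwapB v w = false := by
  by_contra hs
  rw [Bool.not_eq_false] at hs
  simp only [isRepB, Bool.and_eq_true, beq_iff_eq, decide_eq_true_eq] at hr
  simp only [isSwapB, Bool.and_eq_true, beq_iff_eq, decide_eq_true_eq] at hs
  obtain ⟨⟨hi, -⟩, hdropr⟩ := hr
  obtain ⟨⟨⟨hi1, hs1⟩, hs2⟩, -⟩ := hs
  set i := pvMismatch v w with hidef
  have hgv : v.getD (i+1) ' ' = (v.drop (i+1)).getD 0 ' ' := by
    rw [List.getD_eq_getElem v ' ' (by omega), List.getD_eq_getElem _ ' ' (by simp; omega)]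
    simp [List.getElem_drop]
  have hgw : w.getD (i+1) ' ' = (w.drop (i+1)).getD 0 ' ' := by
    rw [List.getD_eq_getElem w ' ' (by omega), List.getD_eq_getElem _ ' ' (by simp; omega)]
    simp [List.getElem_drop]
  have heq : v.getD (i+1) ' ' = w.getD (i+1) ' ' := by rw [hgv, hgw, hdropr]
  have hne := pvMismatch_ne v w (by omega) (by omega)
  rw [← hidef] at hne
  apply hne
  rw [hs1, ← heq, hs2]

-- Python's min(xs) on strings only depends on the set of elements
theorem min?_congr (l₁ l₂ : List String) (h : ∀ v, v ∈ l₁ ↔ v ∈ l₂) :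
    PySem.List.min? l₁ (fun x => x) = PySem.List.min? l₂ (fun x => x) := by
  cases hm₁ : PySem.List.min? l₁ (fun x => x) with
  | none =>
      rw [PySem.List.min?_eq_none_iff] at hm₁
      have : l₂ = [] := by
        cases l₂ with
        | nil => rfl
        | cons a t => exact absurd ((h a).mpr (by simp)) (by simp [hm₁])
      rw [eq_comm, PySem.List.min?_eq_none_iff]
      exact this
  | some m₁ =>
      have hmem₁ := PySem.List.min?_mem hm₁
      cases hm₂ : PySem.List.min? l₂ (fun x => x) with
      | none =>
          rw [PySem.List.min?_eq_none_iff] at hm₂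
          exact absurd ((h m₁).mp hmem₁) (by simp [hm₂])
      | some m₂ =>
          have hmem₂ := PySem.List.min?_mem hm₂
          have h₁ := PySem.List.min?_isMin hm₁ m₂ ((h m₂).mpr hmem₂)
          have h₂ := PySem.List.min?_isMin hm₂ m₁ ((h m₁).mp hmem₁)
          exact congrArg some (le_antisymm h₁ h₂)

theorem eq_nil_iff_of_mem_iff {l₁ l₂ : List String} (h : ∀ v, v ∈ l₁ ↔ v ∈ l₂) :
    (l₁ = []) ↔ (l₂ = []) := by
  constructor
  · intro he
    cases l₂ with
    | nil => rfl
    | cons a t => exact absurd ((h a).mpr (by simp)) (by simp [he])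
  · intro he
    cases l₁ with
    | nil => rfl
    | cons a t => exact absurd ((h a).mp (by simp)) (by simp [he])

theorem any_iff_filter_ne_nil {α : Type} (l : List α) (p : α → Bool) :
    l.any p = true ↔ l.filter p ≠ [] := by
  simp [List.any_eq_true, List.filter_eq_nil_iff]

-- ===== VERDICT (by name: the statement is the Claim_ definition above) =====
theorem fix_words_spec : Claim_equal_fix_words := by
  intro dic word letters _
  unfold Spec_fix_words
  by_cases hf : word ∈ dic
  · simp [fix_words, fix_words_alt, hf]
  · have hneW : ∀ v : String, v ∈ dic → v.toList ≠ word.toList := by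
      intro v hv hh
      exact hf (String.toList_inj.mp hh ▸ hv)
    set W := word.toList with hWdef
    set L := letters.toList with hLdef
    set p : String → Bool := fun t => decide (t ∈ dic) with hpdef
    -- the three membership equivalences
    have hdropmem : ∀ v,
        (v ∈ ((List.range W.length).map (fun i => String.ofList (W.eraseIdx i))).filter p
          ↔ v ∈ dic.filter (fun w => ((w.toList.length : Int) == (W.length : Int) - 1) && isDropB w.toList W)) := by
      intro v
      simp only [List.mem_filter, List.mem_map, List.mem_range, hpdef, decide_eq_true_eq,
        Bool.and_eq_true, beq_iff_eq]
      constructor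
      · rintro ⟨⟨i, hi, he⟩, hv⟩
        obtain ⟨hl, hd⟩ := (isDropB_iff v.toList W).mpr ⟨i, hi, by rw [← he]; simp⟩
        exact ⟨hv, hl, hd⟩
      · rintro ⟨hv, hl, hd⟩
        obtain ⟨i, hi, he⟩ := (isDropB_iff v.toList W).mp ⟨hl, hd⟩
        exact ⟨⟨i, hi, by rw [← he, String.ofList_toList]⟩, hv⟩
    have hswapmem : ∀ v,
        (v ∈ ((List.range (W.length - 1)).map
              (fun j => String.ofList ((W.set j (W.getD (j+1) ' ')).set (j+1) (W.getD j ' ')))).filter p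
          ↔ v ∈ dic.filter (fun w => !(((w.toList.length : Int) == (W.length : Int) - 1) && isDropB w.toList W)
                && (((w.toList.length : Int) == (W.length : Int)) && isSwapB w.toList W))) := by
      intro v
      simp only [List.mem_filter, List.mem_map, List.mem_range, hpdef, decide_eq_true_eq,
        Bool.and_eq_true, Bool.not_eq_eq_eq_not, Bool.not_true, beq_iff_eq]
      constructor
      · rintro ⟨⟨j, hj, he⟩, hv⟩
        obtain ⟨hl, hs⟩ := (isSwapB_iff v.toList W (hneW v hv)).mpr
          ⟨j, by omega, by rw [← he]; simp⟩
        refine ⟨hv, ?_, hl, hs⟩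
        simp only [Bool.and_eq_false_iff]
        left
        simp only [beq_eq_false_iff_ne, ne_eq]
        omega
      · rintro ⟨hv, -, hl, hs⟩
        obtain ⟨j, hj, he⟩ := (isSwapB_iff v.toList W (hneW v hv)).mp ⟨hl, hs⟩
        exact ⟨⟨j, by omega, by rw [← he, String.ofList_toList]⟩, hv⟩
    have hrepmem : ∀ v,
        (v ∈ ((List.range W.length).flatMap
              (fun x => (L.map (fun y => String.ofList (W.set x y))).filter p))
          ↔ v ∈ dic.filter (fun w => !(((w.toList.length : Int) == (W.length : Int) - 1) && isDropB w.toList W)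
                && !(((w.toList.length : Int) == (W.length : Int)) && isSwapB w.toList W)
                && (((w.toList.length : Int) == (W.length : Int)) && isRepB w.toList W L))) := by
      intro v
      simp only [List.mem_filter, List.mem_flatMap, List.mem_map, List.mem_range, hpdef,
        decide_eq_true_eq, Bool.and_eq_true, beq_iff_eq]
      constructor
      · rintro ⟨x, hx, ⟨y, hy, he⟩, hv⟩
        obtain ⟨hl, hr⟩ := (isRepB_iff L v.toList W (hneW v hv)).mpr
          ⟨x, hx, y, hy, by rw [← he]; simp⟩
        have hlen : v.toList.length = W.length := by exact_mod_cast hl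
        refine ⟨hv, ⟨?_, ?_⟩, hl, hr⟩
        · simp only [Bool.not_eq_true', Bool.and_eq_false_iff]
          left
          simp only [beq_eq_false_iff_ne, ne_eq]
          omega
        · simp only [Bool.not_eq_true', Bool.and_eq_false_iff]
          right
          exact not_swap_of_rep L v.toList W hlen hr
      · rintro ⟨hv, -, hl, hr⟩
        obtain ⟨x, hx, y, hy, he⟩ := (isRepB_iff L v.toList W (hneW v hv)).mp ⟨hl, hr⟩
        exact ⟨x, hx, ⟨y, hy, by rw [← he, String.ofList_toList]⟩, hv⟩
    -- evaluate both programs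
    simp only [fix_words, fix_words_alt, hf, if_false, ← hWdef, ← hLdef]
    rw [foldB_eq]
    simp only [foldA_eq, foldOr_eq, ← hpdef, Bool.false_or, List.nil_append]
    by_cases h1 : dic.filter (fun w => ((w.toList.length : Int) == (W.length : Int) - 1) && isDropB w.toList W) = []
    case neg =>
      have ha1 : ((List.range W.length).map (fun i => String.ofList (W.eraseIdx i))).any p = true := by
        rw [any_iff_filter_ne_nil]
        intro hc
        exact h1 ((eq_nil_iff_of_mem_iff hdropmem).mp hc)
      simp only [ha1, if_true, h1, ne_eq, not_false_eq_true]
      rw [min?_congr _ _ hdropmem]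
    case pos =>
      have ha1 : ((List.range W.length).map (fun i => String.ofList (W.eraseIdx i))).any p = false := by
        rw [← Bool.not_eq_true, any_iff_filter_ne_nil, not_ne_iff]
        exact (eq_nil_iff_of_mem_iff hdropmem).mpr h1
      by_cases h2 : dic.filter (fun w => !(((w.toList.length : Int) == (W.length : Int) - 1) && isDropB w.toList W)
                && (((w.toList.length : Int) == (W.length : Int)) && isSwapB w.toList W)) = []
      case neg =>
        have ha2 : ((List.range (W.length - 1)).map
              (fun j => String.ofList ((W.set j (W.getD (j+1) ' ')).set (j+1) (W.getD j ' ')))).any p = true := by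
          rw [any_iff_filter_ne_nil]
          intro hc
          exact h2 ((eq_nil_iff_of_mem_iff hswapmem).mp hc)
        simp only [ha1, ha2, if_true, Bool.false_eq_true, if_false, h1, h2, ne_eq,
          not_false_eq_true, not_true_eq_false]
        rw [min?_congr _ _ hswapmem]
      case pos =>
        have ha2 : ((List.range (W.length - 1)).map
              (fun j => String.ofList ((W.set j (W.getD (j+1) ' ')).set (j+1) (W.getD j ' ')))).any p = false := by
          rw [← Bool.not_eq_true, any_iff_filter_ne_nil, not_ne_iff]
          exact (eq_nil_iff_of_mem_iff hswapmem).mpr h2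
        by_cases h3 : dic.filter (fun w => !(((w.toList.length : Int) == (W.length : Int) - 1) && isDropB w.toList W)
                && !(((w.toList.length : Int) == (W.length : Int)) && isSwapB w.toList W)
                && (((w.toList.length : Int) == (W.length : Int)) && isRepB w.toList W L)) = []
        case neg =>
          have ha3 : ((List.range W.length).any
                (fun x => (L.map (fun y => String.ofList (W.set x y))).any p)) = true := by
            have hflat : (List.range W.length).flatMap
                (fun x => (L.map (fun y => String.ofList (W.set x y))).filter p) ≠ [] := by
              intro hc
              exact h3 ((eq_nil_iff_of_mem_iff hrepmem).mp hc)
            rw [Ne, List.flatMap_eq_nil_iff] at hflat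
            push Not at hflat
            obtain ⟨x, hx, hfx⟩ := hflat
            rw [List.any_eq_true]
            exact ⟨x, hx, (any_iff_filter_ne_nil _ _).mpr hfx⟩
          simp only [ha1, ha2, ha3, if_true, Bool.false_eq_true, if_false, h1, h2, h3, ne_eq,
            not_false_eq_true, not_true_eq_false]
          rw [min?_congr _ _ hrepmem]
        case pos =>
          have ha3 : ((List.range W.length).any
                (fun x => (L.map (fun y => String.ofList (W.set x y))).any p)) = false := by
            have hflat : (List.range W.length).flatMap
                (fun x => (L.map (fun y => String.ofList (W.set x y))).filter p) = [] :=
              (eq_nil_iff_of_mem_iff hrepmem).mpr h3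
            rw [← Bool.not_eq_true, List.any_eq_true]
            rintro ⟨x, hx, hax⟩
            rw [any_iff_filter_ne_nil] at hax
            exact hax (List.flatMap_eq_nil_iff.mp hflat _ hx)
          simp only [ha1, ha2, ha3, Bool.false_eq_true, if_false, h1, h2, h3, ne_eq,
            not_true_eq_false]
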